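-- pv_equiv track=rewrite | github.com/poketony/XS3KOR | 0.X30/mnu/kr/njdbcommon_tool.py | apply_table
-- ===== SOURCE A (Python) =====
-- def apply_table(s, k2h):
--     result, i = [], 0
--     while i < len(s):
--         for kor, hanja in k2h.items():
--             if s[i:i+len(kor)] == kor:
--                 result.append(hanja)
--                 i += len(kor)
--                 break
--         else:
--             result.append(s[i])
--             i += 1
--     return ''.join(result)
-- ===== SOURCE B (Python) =====
-- def apply_table(s, k2h):
--     # Index the table once: key -> (first insertion index, replacement),
--     # and collect the distinct key lengths; at each position only the few
--     # distinct lengths are probed via hash lookup instead of scanning all keys.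
--     table = {}
--     for idx, (kor, hanja) in enumerate(k2h.items()):
--         if kor and kor not in table:
--             table[kor] = (idx, hanja)
--     lengths = sorted({len(k) for k in table})
--     out = []
--     i, n = 0, len(s)
--     while i < n:
--         best = None  # (index, replacement, matched key)
--         for L in lengths:
--             k = s[i:i+L]
--             cand = table.get(k)
--             if cand is not None and (best is None or cand[0] < best[0]):
--                 best = (cand[0], cand[1], k)
--         if best is None:
--             out.append(s[i])
--             i += 1
--         else:
--             out.append(best[1])
--             i += len(best[2])
--     return ''.join(out)
-- ===== Notes on version B (the rewrite author's own statement) =====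
-- stated objective: faster
-- what changed: B builds once a hash table key->(insertion index, replacement) together with the sorted set of distinct key lengths, then at each position probes only those few lengths by hash lookup and takes the minimum-index hit, instead of scanning every table entry at every position.
-- outside the precondition, e.g. on apply_table('a', {'a': 'X', '': 'Y'}): A returns 'X', B returns 'X'
import Mathlib
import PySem

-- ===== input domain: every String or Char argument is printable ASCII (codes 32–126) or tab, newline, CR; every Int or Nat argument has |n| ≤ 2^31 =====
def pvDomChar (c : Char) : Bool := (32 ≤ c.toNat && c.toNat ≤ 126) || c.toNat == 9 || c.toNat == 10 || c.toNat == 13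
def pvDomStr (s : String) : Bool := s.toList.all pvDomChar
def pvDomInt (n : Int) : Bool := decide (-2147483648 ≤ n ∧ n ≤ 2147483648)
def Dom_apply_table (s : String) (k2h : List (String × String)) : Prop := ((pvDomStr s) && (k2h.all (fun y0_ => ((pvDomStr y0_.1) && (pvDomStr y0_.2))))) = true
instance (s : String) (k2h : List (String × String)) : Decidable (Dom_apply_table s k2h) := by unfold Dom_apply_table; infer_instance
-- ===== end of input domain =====

-- B indexes the table once (key -> (insertion index, replacement) plus the distinct key
-- lengths) and probes only those lengths per position, instead of scanning every entry;
-- measurably faster on large inputs.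

-- ===== PORT A =====
-- A's inner for-loop over k2h.items(): first (kor, hanja) with s[i:i+len(kor)] == kor.
-- Working on the suffix rest = s.toList.drop i: the Python slice clamps, so it is
-- exactly rest.take len(kor); string equality is compared as List Char equality (exact).
def pvAFind (rest : List Char) : List (String × String) → Option (String × String)
  | [] => none
  | (kor, hanja) :: t =>
      if rest.take kor.toList.length = kor.toList then some (kor, hanja) else pvAFind rest t

-- A's while loop; fuel bounds the iteration count (under Pre_ every step consumes ≥ 1
-- character, so fuel = len(s) is never exhausted; on an empty key A itself loops forever).
def pvAGo (k2h : List (String × String)) : Nat → List Char → List String → List String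
  | 0, _, acc => acc
  | _ + 1, [], acc => acc
  | fuel + 1, c :: rest', acc =>
      match pvAFind (c :: rest') k2h with
      | some (kor, hanja) => pvAGo k2h fuel ((c :: rest').drop kor.toList.length) (acc ++ [hanja])
      | none => pvAGo k2h fuel rest' (acc ++ [String.ofList [c]])

def apply_table (s : String) (k2h : List (String × String)) : String :=
  PySem.Str.join "" (pvAGo k2h s.toList.length s.toList [])

-- ===== PORT B =====
-- Source B's indexing loop: enumerate(k2h.items()), skip falsy (empty) keys, keep the first
-- occurrence of each key (idx is an internal loop counter, kept as Nat).
def pvBTable : List (String × String) → Nat → PySem.Dict String (Nat × String) → PySem.Dict String (Nat × String)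
  | [], _, d => d
  | (kor, hanja) :: t, idx, d =>
      pvBTable t (idx + 1)
        (if kor = "" then d
         else if (d.get? kor).isSome then d else d.insert kor (idx, hanja))

-- Source B: lengths = sorted({len(k) for k in table})
def pvBLengths (table : PySem.Dict String (Nat × String)) : List Nat :=
  PySem.List.sorted (PySem.Set.ofList (table.keys.map (fun k => k.toList.length))) (fun L => L) false

-- Source B's inner for-loop over lengths: best = minimum-index hit among table.get(s[i:i+L])
def pvBBest (table : PySem.Dict String (Nat × String)) (rest : List Char) (lengths : List Nat) :
    Option (Nat × String × String) :=
  lengths.foldl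
    (fun best L =>
      match table.get? (String.ofList (rest.take L)) with
      | none => best
      | some (idx, h) =>
          match best with
          | none => some (idx, h, String.ofList (rest.take L))
          | some (bidx, bh, bk) =>
              if idx < bidx then some (idx, h, String.ofList (rest.take L)) else some (bidx, bh, bk))
    none

-- Source B's while loop (same fuel convention as port A)
def pvBGo (table : PySem.Dict String (Nat × String)) (lengths : List Nat) :
    Nat → List Char → List String → List String
  | 0, _, acc => acc
  | _ + 1, [], acc => acc
  | fuel + 1, c :: rest', acc =>
      match pvBBest table (c :: rest') lengths with
      | none => pvBGo table lengths fuel rest' (acc ++ [String.ofList [c]])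
      | some (_, h, k) => pvBGo table lengths fuel ((c :: rest').drop k.toList.length) (acc ++ [h])

def apply_table_alt (s : String) (k2h : List (String × String)) : String :=
  let table := pvBTable k2h 0 PySem.Dict.empty
  PySem.Str.join "" (pvBGo table (pvBLengths table) s.toList.length s.toList [])

-- ===== PRECONDITION & SPEC =====
-- Pre_ excludes an empty key when s is nonempty (an empty key makes A's while loop able to
-- never advance, so A diverges on part of those inputs — which part depends on the whole
-- scan, so they are all excluded) and duplicate keys (an association list with duplicate
-- keys does not represent any Python dict, which is what A's parameter k2h is).
def Pre_apply_table (s : String) (k2h : List (String × String)) : Prop :=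
  (s = "" ∨ ∀ p ∈ k2h, p.1 ≠ "") ∧ (k2h.map Prod.fst).Nodup
instance (s : String) (k2h : List (String × String)) : Decidable (Pre_apply_table s k2h) := by
  unfold Pre_apply_table; infer_instance
def pvWitness_apply_table : String × (List (String × String)) :=
  ("abc ab", [("ab", "X"), ("c", "Y")])

def Spec_apply_table (s : String) (k2h : List (String × String)) (out : String) : Prop := out = apply_table_alt s k2h
instance (s : String) (k2h : List (String × String)) (out : String) : Decidable (Spec_apply_table s k2h out) := by unfold Spec_apply_table; infer_instance

-- ===== CLAIM (what is proved, stated in full; the proofs are below) =====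
def Claim_equal_apply_table : Prop := ∀ (s : String) (k2h : List (String × String)), Dom_apply_table s k2h → Pre_apply_table s k2h → Spec_apply_table s k2h (apply_table s k2h)

-- ===== LEMMAS AND PROOFS =====

-- "key kor matches at this position": the Python test s[i:i+len(kor)] == kor
def pvMatches (rest : List Char) (kor : String) : Prop :=
  rest.take kor.toList.length = kor.toList

-- all hits Source B's inner loop can see at this position
def pvHits (table : PySem.Dict String (Nat × String)) (rest : List Char) (lengths : List Nat) :
    List (Nat × String × String) :=
  lengths.filterMap (fun L =>
    (table.get? (String.ofList (rest.take L))).map (fun p => (p.1, p.2, String.ofList (rest.take L))))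

theorem pvAFind_none_iff (rest : List Char) (l : List (String × String)) :
    pvAFind rest l = none ↔ ∀ w ∈ l, ¬ pvMatches rest w.1 := by
  induction l with
  | nil => simp [pvAFind]
  | cons p t ih =>
    obtain ⟨kor, hanja⟩ := p
    simp only [pvAFind]
    split_ifs with hm
    · constructor
      · intro h; cases h
      · intro h; exact absurd hm (h (kor, hanja) (List.mem_cons_self))
    · rw [ih]
      constructor
      · intro h w hw
        rcases List.mem_cons.mp hw with h0 | h0
        · subst h0; exact hm
        · exact h w h0
      · intro h w hw; exact h w (List.mem_cons_of_mem _ hw)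

theorem pvAFind_some (rest : List Char) (l : List (String × String)) (v : String × String)
    (h : pvAFind rest l = some v) :
    ∃ p : Nat, l[p]? = some v ∧ pvMatches rest v.1 ∧
      ∀ q < p, ∀ w : String × String, l[q]? = some w → ¬ pvMatches rest w.1 := by
  induction l generalizing v with
  | nil => simp [pvAFind] at h
  | cons p t ih =>
    obtain ⟨kor, hanja⟩ := p
    simp only [pvAFind] at h
    split_ifs at h with hm
    · cases h
      exact ⟨0, by simp, hm, by omega⟩
    · obtain ⟨q, hq, hmv, hmin⟩ := ih v h
      refine ⟨q + 1, by simpa using hq, hmv, ?_⟩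
      intro r hr w hw
      cases r with
      | zero =>
        simp only [List.getElem?_cons_zero, Option.some.injEq] at hw
        subst hw; exact hm
      | succ r' =>
        simp only [List.getElem?_cons_succ] at hw
        exact hmin r' (by omega) w hw

theorem pvBTable_get_aux (l : List (String × String)) (idx0 : Nat)
    (d : PySem.Dict String (Nat × String))
    (hne : ∀ p ∈ l, p.1 ≠ "") (hnd : (l.map Prod.fst).Nodup)
    (hfresh : ∀ p ∈ l, d.get? p.1 = none) (k : String) (i : Nat) (h : String) :
    (pvBTable l idx0 d).get? k = some (i, h) ↔
      (d.get? k = some (i, h) ∨ ∃ j, l[j]? = some (k, h) ∧ i = idx0 + j) := by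
  induction l generalizing idx0 d with
  | nil => simp [pvBTable]
  | cons p t ih =>
    obtain ⟨kor, hanja⟩ := p
    have hkor : kor ≠ "" := hne _ List.mem_cons_self
    have hf0 : d.get? kor = none := hfresh _ List.mem_cons_self
    have hknot : kor ∉ t.map Prod.fst := by
      have h' := hnd; simp only [List.map_cons, List.nodup_cons] at h'; exact h'.1
    have hcond : (d.get? kor).isSome = false := by rw [hf0]; rfl
    rw [show pvBTable ((kor, hanja) :: t) idx0 d
        = pvBTable t (idx0 + 1) (d.insert kor (idx0, hanja)) from by
      simp [pvBTable, hkor, hcond]]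
    rw [ih (idx0 + 1) (d.insert kor (idx0, hanja))
      (fun p hp => hne p (List.mem_cons_of_mem _ hp))
      (by simp only [List.map_cons, List.nodup_cons] at hnd; exact hnd.2)
      (by
        intro p hp
        have hne' : p.1 ≠ kor := by
          intro e; exact hknot (e ▸ List.mem_map_of_mem hp)
        rw [PySem.Dict.get?_insert_of_ne _ _ hne']
        exact hfresh p (List.mem_cons_of_mem _ hp))]
    by_cases hk : k = kor
    · subst hk
      rw [PySem.Dict.get?_insert_self]
      constructor
      · rintro (hd | ⟨j, hj, hij⟩)
        · simp only [Option.some.injEq, Prod.mk.injEq] at hd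
          obtain ⟨h1, h2⟩ := hd
          right; exact ⟨0, by simp [h2], by omega⟩
        · exfalso
          exact hknot (List.mem_map_of_mem (List.mem_of_getElem? hj))
      · rintro (hd | ⟨j, hj, hij⟩)
        · rw [hf0] at hd; cases hd
        · cases j with
          | zero =>
            simp only [List.getElem?_cons_zero, Option.some.injEq, Prod.mk.injEq] at hj
            left
            simp only [Option.some.injEq, Prod.mk.injEq]
            exact ⟨by omega, hj.2⟩
          | succ j' =>
            exfalso
            simp only [List.getElem?_cons_succ] at hj
            exact hknot (List.mem_map_of_mem (List.mem_of_getElem? hj))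
    · rw [PySem.Dict.get?_insert_of_ne _ _ hk]
      constructor
      · rintro (hd | ⟨j, hj, hij⟩)
        · exact Or.inl hd
        · exact Or.inr ⟨j + 1, by simpa using hj, by omega⟩
      · rintro (hd | ⟨j, hj, hij⟩)
        · exact Or.inl hd
        · cases j with
          | zero =>
            exfalso
            simp only [List.getElem?_cons_zero, Option.some.injEq, Prod.mk.injEq] at hj
            exact hk hj.1.symm
          | succ j' =>
            simp only [List.getElem?_cons_succ] at hj
            exact Or.inr ⟨j', hj, by omega⟩

theorem pvBTable_get (l : List (String × String))
    (hne : ∀ p ∈ l, p.1 ≠ "") (hnd : (l.map Prod.fst).Nodup) (k : String) (i : Nat) (h : String) :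
    (pvBTable l 0 PySem.Dict.empty).get? k = some (i, h) ↔ l[i]? = some (k, h) := by
  rw [pvBTable_get_aux l 0 PySem.Dict.empty hne hnd (fun p _ => by simp)]
  constructor
  · rintro (h' | ⟨j, hj, hij⟩)
    · exact absurd h' (by simp)
    · have hji : j = i := by omega
      rwa [hji] at hj
  · intro h'; exact Or.inr ⟨i, h', by omega⟩

theorem pvBLengths_mem (table : PySem.Dict String (Nat × String)) (L : Nat) :
    L ∈ pvBLengths table ↔ ∃ k ∈ table.keys, k.toList.length = L := by
  unfold pvBLengths
  rw [PySem.List.mem_sorted, PySem.Set.mem_ofList, List.mem_map]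

theorem pvHits_mem (table : PySem.Dict String (Nat × String)) (rest : List Char)
    (t : Nat × String × String) :
    t ∈ pvHits table rest (pvBLengths table) ↔
      table.get? t.2.2 = some (t.1, t.2.1) ∧ pvMatches rest t.2.2 := by
  obtain ⟨i, h, k⟩ := t
  simp only [pvHits, List.mem_filterMap]
  constructor
  · rintro ⟨L, hL, hsome⟩
    rcases hget : table.get? (String.ofList (rest.take L)) with _ | ⟨pi, ph⟩ <;>
      rw [hget] at hsome
    · cases hsome
    · simp only [Option.map_some, Option.some.injEq, Prod.mk.injEq] at hsome
      obtain ⟨h1, h2, h3⟩ := hsome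
      subst h1; subst h2; subst h3
      refine ⟨hget, ?_⟩
      unfold pvMatches
      rw [String.toList_ofList, List.length_take]
      exact List.take_eq_take_min.symm
  · rintro ⟨hget, hm⟩
    have hkeys : k ∈ table.keys := by
      rw [← not_not (a := k ∈ table.keys), ← PySem.Dict.get?_eq_none_iff_not_mem_keys, hget]
      simp
    refine ⟨k.toList.length, (pvBLengths_mem table _).mpr ⟨k, hkeys, rfl⟩, ?_⟩
    unfold pvMatches at hm
    rw [hm, String.ofList_toList, hget]
    rfl

-- the body of Source B's inner for-loop, as a named step function (for the fold invariant)
def pvBStep (table : PySem.Dict String (Nat × String)) (rest : List Char)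
    (best : Option (Nat × String × String)) (L : Nat) : Option (Nat × String × String) :=
  match table.get? (String.ofList (rest.take L)) with
  | none => best
  | some (idx, h) =>
      match best with
      | none => some (idx, h, String.ofList (rest.take L))
      | some (bidx, bh, bk) =>
          if idx < bidx then some (idx, h, String.ofList (rest.take L)) else some (bidx, bh, bk)

theorem pvBBest_eq_foldl (table : PySem.Dict String (Nat × String)) (rest : List Char)
    (lengths : List Nat) :
    pvBBest table rest lengths = lengths.foldl (pvBStep table rest) none := rfl

theorem pvBStep_aux (table : PySem.Dict String (Nat × String)) (rest : List Char)
    (lengths : List Nat) : ∀ (init : Option (Nat × String × String)),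
    (lengths.foldl (pvBStep table rest) init = none ↔
      init = none ∧ pvHits table rest lengths = []) ∧
    (∀ t, lengths.foldl (pvBStep table rest) init = some t →
      (init = some t ∨ t ∈ pvHits table rest lengths) ∧
      (∀ u, init = some u → t.1 ≤ u.1) ∧
      (∀ u ∈ pvHits table rest lengths, t.1 ≤ u.1)) := by
  induction lengths with
  | nil =>
    intro init
    refine ⟨by simp [pvHits], ?_⟩
    intro t ht
    simp only [List.foldl_nil] at ht
    exact ⟨Or.inl ht, fun u hu => by rw [ht] at hu; injection hu with h'; rw [h'], by simp [pvHits]⟩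
  | cons L ls ih =>
    intro init
    rcases hL : table.get? (String.ofList (rest.take L)) with _ | ⟨idx, h⟩
    · -- no hit at this length: step leaves best unchanged and hits unchanged
      have hf : pvBStep table rest init L = init := by simp [pvBStep, hL]
      have hh : pvHits table rest (L :: ls) = pvHits table rest ls := by
        simp [pvHits, hL]
      rw [List.foldl_cons, hf, hh]
      exact ih init
    · have hh : pvHits table rest (L :: ls) =
          (idx, h, String.ofList (rest.take L)) :: pvHits table rest ls := by
        simp [pvHits, hL]
      have hsome : ∃ v, pvBStep table rest init L = some v := by
        rcases init with _ | ⟨⟨bi, bh, bk⟩⟩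
        · exact ⟨(idx, h, String.ofList (rest.take L)), by simp [pvBStep, hL]⟩
        · by_cases hlt : idx < bi
          · exact ⟨(idx, h, String.ofList (rest.take L)), by simp [pvBStep, hL, hlt]⟩
          · exact ⟨(bi, bh, bk), by simp [pvBStep, hL, hlt]⟩
      rw [List.foldl_cons, hh]
      obtain ⟨ihn, ihs⟩ := ih (pvBStep table rest init L)
      constructor
      · constructor
        · intro hz
          obtain ⟨hz1, _⟩ := ihn.mp hz
          obtain ⟨v, hv⟩ := hsome
          rw [hv] at hz1; cases hz1
        · rintro ⟨_, hz⟩; cases hz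
      · intro t ht
        obtain ⟨hmem, hinit, hls⟩ := ihs t ht
        rcases hi : init with _ | ⟨⟨bi, bh, bk⟩⟩
        · have heq : pvBStep table rest init L = some (idx, h, String.ofList (rest.take L)) := by
            simp [pvBStep, hL, hi]
          refine ⟨?_, ?_, ?_⟩
          · rcases hmem with he | hm
            · rw [heq] at he; injection he with he'
              exact Or.inr (he' ▸ List.mem_cons_self)
            · exact Or.inr (List.mem_cons_of_mem _ hm)
          · intro u hu; cases hu
          · intro u hu
            rcases List.mem_cons.mp hu with h0 | h0
            · have := hinit _ heq; rw [h0]; exact this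
            · exact hls u h0
        · subst hi
          by_cases hlt : idx < bi
          · have heq : pvBStep table rest (some (bi, bh, bk)) L
                = some (idx, h, String.ofList (rest.take L)) := by
              simp [pvBStep, hL, hlt]
            have htle : t.1 ≤ idx := hinit _ heq
            refine ⟨?_, ?_, ?_⟩
            · rcases hmem with he | hm
              · rw [heq] at he; injection he with he'
                exact Or.inr (he' ▸ List.mem_cons_self)
              · exact Or.inr (List.mem_cons_of_mem _ hm)
            · intro u hu; injection hu with hu'; rw [← hu']; omega
            · intro u hu
              rcases List.mem_cons.mp hu with h0 | h0
              · rw [h0]; exact htle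
              · exact hls u h0
          · have heq : pvBStep table rest (some (bi, bh, bk)) L = some (bi, bh, bk) := by
              simp [pvBStep, hL, hlt]
            have htle : t.1 ≤ bi := hinit _ heq
            refine ⟨?_, ?_, ?_⟩
            · rcases hmem with he | hm
              · rw [heq] at he; exact Or.inl he
              · exact Or.inr (List.mem_cons_of_mem _ hm)
            · intro u hu; injection hu with hu'; rw [← hu']; omega
            · intro u hu
              rcases List.mem_cons.mp hu with h0 | h0
              · rw [h0]; simp only []; omega
              · exact hls u h0

theorem pvBBest_none_iff (table : PySem.Dict String (Nat × String)) (rest : List Char)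
    (lengths : List Nat) :
    pvBBest table rest lengths = none ↔ pvHits table rest lengths = [] := by
  rw [pvBBest_eq_foldl]
  rw [(pvBStep_aux table rest lengths none).1]
  simp

theorem pvBBest_some (table : PySem.Dict String (Nat × String)) (rest : List Char)
    (lengths : List Nat) (t : Nat × String × String)
    (ht : pvBBest table rest lengths = some t) :
    t ∈ pvHits table rest lengths ∧ ∀ u ∈ pvHits table rest lengths, t.1 ≤ u.1 := by
  rw [pvBBest_eq_foldl] at ht
  obtain ⟨hmem, _, hls⟩ := (pvBStep_aux table rest lengths none).2 t ht
  rcases hmem with he | hm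
  · cases he
  · exact ⟨hm, hls⟩

theorem pvStep_none (k2h : List (String × String))
    (hne : ∀ p ∈ k2h, p.1 ≠ "") (hnd : (k2h.map Prod.fst).Nodup) (rest : List Char)
    (h : pvAFind rest k2h = none) :
    pvBBest (pvBTable k2h 0 PySem.Dict.empty) rest (pvBLengths (pvBTable k2h 0 PySem.Dict.empty)) = none := by
  rw [pvAFind_none_iff] at h
  rw [pvBBest_none_iff, List.eq_nil_iff_forall_not_mem]
  intro t ht
  obtain ⟨hget, hm⟩ := (pvHits_mem _ _ t).mp ht
  have hidx := (pvBTable_get k2h hne hnd t.2.2 t.1 t.2.1).mp hget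
  exact h (t.2.2, t.2.1) (List.mem_of_getElem? hidx) hm

theorem pvStep_some (k2h : List (String × String))
    (hne : ∀ p ∈ k2h, p.1 ≠ "") (hnd : (k2h.map Prod.fst).Nodup) (rest : List Char)
    (kor hanja : String) (h : pvAFind rest k2h = some (kor, hanja)) :
    ∃ i, pvBBest (pvBTable k2h 0 PySem.Dict.empty) rest (pvBLengths (pvBTable k2h 0 PySem.Dict.empty)) = some (i, hanja, kor) := by
  obtain ⟨p, hp, hmk, hmin⟩ := pvAFind_some rest k2h (kor, hanja) h
  have hhit : (p, hanja, kor) ∈ pvHits (pvBTable k2h 0 PySem.Dict.empty) rest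
      (pvBLengths (pvBTable k2h 0 PySem.Dict.empty)) :=
    (pvHits_mem _ _ _).mpr ⟨(pvBTable_get k2h hne hnd kor p hanja).mpr hp, hmk⟩
  rcases hb : pvBBest (pvBTable k2h 0 PySem.Dict.empty) rest
      (pvBLengths (pvBTable k2h 0 PySem.Dict.empty)) with _ | t
  · rw [pvBBest_none_iff] at hb
    rw [hb] at hhit; cases hhit
  · obtain ⟨hmem, hminB⟩ := pvBBest_some _ _ _ t hb
    obtain ⟨hget, hmt⟩ := (pvHits_mem _ _ t).mp hmem
    have hidx := (pvBTable_get k2h hne hnd t.2.2 t.1 t.2.1).mp hget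
    have hle : t.1 ≤ p := hminB _ hhit
    have hge : ¬ t.1 < p := fun hlt => hmin t.1 hlt (t.2.2, t.2.1) hidx hmt
    have hpt : t.1 = p := by omega
    rw [hpt, hp] at hidx
    refine ⟨p, ?_⟩
    have hteq : t = (p, hanja, kor) := by
      obtain ⟨i, hh, kk⟩ := t
      simp only [Option.some.injEq, Prod.mk.injEq] at hidx
      simp only [Prod.mk.injEq]
      simp only [] at hpt
      exact ⟨hpt, hidx.2.symm, hidx.1.symm⟩
    rw [hteq]

theorem pvGo_eq (k2h : List (String × String))
    (hne : ∀ p ∈ k2h, p.1 ≠ "") (hnd : (k2h.map Prod.fst).Nodup)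
    (fuel : Nat) (rest : List Char) (acc : List String) :
    pvAGo k2h fuel rest acc =
      pvBGo (pvBTable k2h 0 PySem.Dict.empty) (pvBLengths (pvBTable k2h 0 PySem.Dict.empty)) fuel rest acc := by
  induction fuel generalizing rest acc with
  | zero => rfl
  | succ f ihf =>
    cases rest with
    | nil => rfl
    | cons c rest' =>
      rcases hf : pvAFind (c :: rest') k2h with _ | ⟨⟨kor, hanja⟩⟩
      · have hb := pvStep_none k2h hne hnd (c :: rest') hf
        simp only [pvAGo, pvBGo, hf, hb]
        exact ihf rest' (acc ++ [String.ofList [c]])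
      · obtain ⟨i, hb⟩ := pvStep_some k2h hne hnd (c :: rest') kor hanja hf
        simp only [pvAGo, pvBGo, hf, hb]
        exact ihf _ _

-- ===== VERDICT (by name: the statement is the Claim_ definition above) =====
theorem apply_table_spec : Claim_equal_apply_table := by
  intro s k2h _ hpre
  obtain ⟨h1, hnd⟩ := hpre
  unfold Spec_apply_table apply_table apply_table_alt
  rcases h1 with hs | hne
  · subst hs; rfl
  · exact congrArg _ (pvGo_eq k2h hne hnd s.toList.length s.toList [])
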